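-- pv_equiv track=rewrite | github.com/JahnaviiB/Myleetcode-DSA | Tiktok 3.py | maximumEfficiency
-- ===== SOURCE A (Python) =====
-- def maximumEfficiency(n, memory):
--     MOD = 10**9 + 7
--
--     def calculateEfficiency(arr):
--         total_efficiency = 0
--         for i, val in enumerate(arr):
--             total_efficiency = (total_efficiency + (i + 1) * val) % MOD
--         return total_efficiency
--
--     max_efficiency = calculateEfficiency(memory)
--
--     for idx in range(1, n // 2 + 1):
--         for i in range(idx, n - idx):
--             j = i + idx
--             memory[i], memory[j] = memory[j], memory[i]
--
--         max_efficiency = max(max_efficiency, calculateEfficiency(memory))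
--
--     return max_efficiency
-- ===== SOURCE B (Python) =====
-- def maximumEfficiency(n, memory):
--     MOD = 10**9 + 7
--     cur = sum((i + 1) * v for i, v in enumerate(memory)) % MOD
--     max_eff = cur
--     for idx in range(1, n // 2 + 1):
--         for i in range(idx, n - idx):
--             j = i + idx
--             cur = (cur + idx * (memory[i] - memory[j])) % MOD
--             memory[i], memory[j] = memory[j], memory[i]
--         max_eff = max(max_eff, cur)
--     return max_eff
-- ===== Notes on version B (the rewrite author's own statement) =====
-- stated objective: faster
-- what changed: B maintains the weighted sum as a running accumulator updated by the swap delta idx*(memory[i]-memory[j]) before each swap, instead of rescanning the whole array with calculateEfficiency after every round; the seed is computed once as a plain sum mod.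
import Mathlib
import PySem

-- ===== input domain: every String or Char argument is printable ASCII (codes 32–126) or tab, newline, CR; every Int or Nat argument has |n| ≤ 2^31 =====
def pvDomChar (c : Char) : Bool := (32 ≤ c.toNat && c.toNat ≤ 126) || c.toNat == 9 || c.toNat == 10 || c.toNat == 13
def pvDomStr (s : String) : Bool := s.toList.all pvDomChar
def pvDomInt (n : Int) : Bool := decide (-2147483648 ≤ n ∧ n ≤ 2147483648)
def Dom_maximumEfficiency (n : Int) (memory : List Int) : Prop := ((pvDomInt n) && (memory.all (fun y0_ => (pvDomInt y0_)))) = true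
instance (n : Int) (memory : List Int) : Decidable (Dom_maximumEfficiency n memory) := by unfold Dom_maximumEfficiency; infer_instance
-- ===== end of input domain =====

-- B maintains the weighted sum as a running delta-updated accumulator instead of rescanning the
-- array after each round; both A and B swap `memory` in place in Python — the equivalence proved
-- here is about the RETURN value (the in-place mutation is identical in A and B anyway).


def pvMOD : Int := 1000000007

-- ===== PORT A =====
-- calculateEfficiency: running (acc + (i+1)*val) % MOD over enumerate(arr)
def pvCalcEff (arr : List Int) : Int :=
  (PySem.List.enumerate arr).foldl (fun acc p => PySem.Int.mod (acc + (p.1 + 1) * p.2) pvMOD) 0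

-- inner swap loop of A: for i in range(idx, n-idx): swap memory[i], memory[i+idx]
def pvSwapLoop (idx n : Int) (mem : List Int) : List Int :=
  (PySem.List.pyRange idx (n - idx) 1).foldl
    (fun m i =>
      let j := i + idx
      PySem.List.pySetD (PySem.List.pySetD m i (PySem.List.pyGetD m j 0)) j (PySem.List.pyGetD m i 0))
    mem

def maximumEfficiency (n : Int) (memory : List Int) : Int :=
  ((PySem.List.pyRange 1 (PySem.Int.floordiv n 2 + 1) 1).foldl
    (fun (st : List Int × Int) idx =>
      let mem := pvSwapLoop idx n st.1
      (mem, max st.2 (pvCalcEff mem)))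
    (memory, pvCalcEff memory)).2

-- ===== PORT B =====
-- one round of B: delta-update cur = (cur + idx*(m[i]-m[j])) % MOD, then swap
def pvRoundB (idx n : Int) (st : List Int × Int) : List Int × Int :=
  (PySem.List.pyRange idx (n - idx) 1).foldl
    (fun (st : List Int × Int) i =>
      let m := st.1
      let j := i + idx
      let cur := PySem.Int.mod (st.2 + idx * (PySem.List.pyGetD m i 0 - PySem.List.pyGetD m j 0)) pvMOD
      (PySem.List.pySetD (PySem.List.pySetD m i (PySem.List.pyGetD m j 0)) j (PySem.List.pyGetD m i 0), cur))
    st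

def maximumEfficiency_alt (n : Int) (memory : List Int) : Int :=
  let cur0 := PySem.Int.mod (((PySem.List.enumerate memory).map (fun p => (p.1 + 1) * p.2)).sum) pvMOD
  ((PySem.List.pyRange 1 (PySem.Int.floordiv n 2 + 1) 1).foldl
    (fun (st : (List Int × Int) × Int) idx =>
      let r := pvRoundB idx n st.1
      (r, max st.2 r.2))
    ((memory, cur0), cur0)).2

-- ===== PRECONDITION & SPEC =====
-- Pre_ excludes exactly the inputs where A raises IndexError: n ≥ 3 with fewer than n elements.
def Pre_maximumEfficiency (n : Int) (memory : List Int) : Prop :=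
  n ≤ (memory.length : Int) ∨ n ≤ 2
instance (n : Int) (memory : List Int) : Decidable (Pre_maximumEfficiency n memory) := by
  unfold Pre_maximumEfficiency; infer_instance

def pvWitness_maximumEfficiency : Int × List Int := (4, [3, -1, 2, 5])

def Spec_maximumEfficiency (n : Int) (memory : List Int) (out : Int) : Prop := out = maximumEfficiency_alt n memory
instance (n : Int) (memory : List Int) (out : Int) : Decidable (Spec_maximumEfficiency n memory out) := by unfold Spec_maximumEfficiency; infer_instance

-- ===== CLAIM (what is proved, stated in full; the proofs are below) =====
def Claim_equal_maximumEfficiency : Prop := ∀ (n : Int) (memory : List Int), Dom_maximumEfficiency n memory → Pre_maximumEfficiency n memory → Spec_maximumEfficiency n memory (maximumEfficiency n memory)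

-- ===== LEMMAS AND PROOFS =====

-- weighted sum Σ (w+k)*xs[k] starting at weight w
def pvW (w : Int) : List Int → Int
  | [] => 0
  | x :: xs => w * x + pvW (w + 1) xs

theorem pvMOD_pos : (0:Int) < pvMOD := by decide

theorem pvW_enum (xs : List Int) : ∀ s : Int,
    ((PySem.List.enumerate xs s).map (fun p => (p.1 + 1) * p.2)).sum = pvW (s + 1) xs := by
  induction xs with
  | nil => intro s; simp [PySem.List.enumerate_nil, pvW]
  | cons x xs ih =>
    intro s
    simp [PySem.List.enumerate_cons, pvW, ih (s + 1)]

theorem pvCalcEff_aux (xs : List Int) : ∀ (s a : Int),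
    (PySem.List.enumerate xs s).foldl (fun acc p => PySem.Int.mod (acc + (p.1 + 1) * p.2) pvMOD)
      (PySem.Int.mod a pvMOD)
    = PySem.Int.mod (a + pvW (s + 1) xs) pvMOD := by
  induction xs with
  | nil => intro s a; simp [PySem.List.enumerate_nil, pvW]
  | cons x xs ih =>
    intro s a
    rw [PySem.List.enumerate_cons]
    simp only [List.foldl_cons]
    have h1 : PySem.Int.mod (PySem.Int.mod a pvMOD + (s + 1) * x) pvMOD
        = PySem.Int.mod (a + (s + 1) * x) pvMOD := by
      simp only [PySem.Int.mod_eq_emod_of_pos pvMOD_pos]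
      rw [Int.emod_add_emod]
    rw [h1, ih (s + 1) (a + (s + 1) * x)]
    simp [pvW]; ring_nf

theorem pvCalcEff_eq (xs : List Int) : pvCalcEff xs = PySem.Int.mod (pvW 1 xs) pvMOD := by
  have := pvCalcEff_aux xs 0 0
  simpa [pvCalcEff, PySem.Int.mod_eq_emod_of_pos pvMOD_pos] using this

-- effect of a single set on the weighted sum
theorem pvW_set (xs : List Int) : ∀ (w : Int) (k : Nat), k < xs.length →
    pvW w (xs.set k v) = pvW w xs + (w + k) * (v - xs.getD k 0) := by
  induction xs with
  | nil => intro w k h; simp at h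
  | cons x xs ih =>
    intro w k h
    cases k with
    | zero => simp [pvW]; ring
    | succ k =>
      simp only [List.set_cons_succ, pvW, List.getD_cons_succ]
      rw [ih (w + 1) k (by simpa using h)]
      push_cast; ring

-- the swap step: weighted sum changes by (j-i)*(m[i]-m[j]); length is preserved
theorem pvW_swap (m : List Int) (i j : Int) (hi0 : 0 ≤ i) (hj0 : 0 ≤ j)
    (hilen : i < (m.length : Int)) (hjlen : j < (m.length : Int)) (hne : i ≠ j) :
    pvW 1 (PySem.List.pySetD (PySem.List.pySetD m i (PySem.List.pyGetD m j 0)) j (PySem.List.pyGetD m i 0))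
      = pvW 1 m + (j - i) * (PySem.List.pyGetD m i 0 - PySem.List.pyGetD m j 0) := by
  rw [PySem.List.pySetD_of_nonneg _ _ hi0, PySem.List.pySetD_of_nonneg _ _ hj0]
  have hiN : i.toNat < m.length := by omega
  have hjN : j.toNat < m.length := by omega
  have hgi : PySem.List.pyGetD m i 0 = m.getD i.toNat 0 := by
    rw [PySem.List.pyGetD_eq_getElem _ _ hi0 hilen]
    simp [List.getD_eq_getElem?_getD, List.getElem?_eq_getElem hiN]
  have hgj : PySem.List.pyGetD m j 0 = m.getD j.toNat 0 := by
    rw [PySem.List.pyGetD_eq_getElem _ _ hj0 hjlen]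
    simp [List.getD_eq_getElem?_getD, List.getElem?_eq_getElem hjN]
  have hneN : i.toNat ≠ j.toNat := by omega
  rw [pvW_set _ 1 j.toNat (by simpa using hjN), pvW_set _ 1 i.toNat hiN]
  have hgetset : (m.set i.toNat (PySem.List.pyGetD m j 0)).getD j.toNat 0 = m.getD j.toNat 0 := by
    simp [List.getD_eq_getElem?_getD, List.getElem?_set_ne hneN]
  rw [hgetset, hgi, hgj]
  have : (i.toNat : Int) = i := by omega
  have hj' : (j.toNat : Int) = j := by omega
  rw [this, hj']; ring

-- inner loop invariant: B's fold tracks A's memory, preserves length, and cur stays pvW mod MOD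
theorem pvInner_inv (idx : Int) (hidx : 0 < idx) :
    ∀ (is : List Int) (m : List Int) (w : Int),
      (∀ i ∈ is, 0 ≤ i ∧ i + idx < (m.length : Int)) →
      (is.foldl
        (fun (st : List Int × Int) i =>
          let mm := st.1
          let j := i + idx
          let cur := PySem.Int.mod (st.2 + idx * (PySem.List.pyGetD mm i 0 - PySem.List.pyGetD mm j 0)) pvMOD
          (PySem.List.pySetD (PySem.List.pySetD mm i (PySem.List.pyGetD mm j 0)) j (PySem.List.pyGetD mm i 0), cur))
        (m, PySem.Int.mod w pvMOD)).1
      = is.foldl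
        (fun mm i =>
          let j := i + idx
          PySem.List.pySetD (PySem.List.pySetD mm i (PySem.List.pyGetD mm j 0)) j (PySem.List.pyGetD mm i 0)) m
      ∧ (is.foldl
        (fun (st : List Int × Int) i =>
          let mm := st.1
          let j := i + idx
          let cur := PySem.Int.mod (st.2 + idx * (PySem.List.pyGetD mm i 0 - PySem.List.pyGetD mm j 0)) pvMOD
          (PySem.List.pySetD (PySem.List.pySetD mm i (PySem.List.pyGetD mm j 0)) j (PySem.List.pyGetD mm i 0), cur))
        (m, PySem.Int.mod w pvMOD)).2
      = PySem.Int.mod (pvW 1 (is.foldl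
          (fun mm i =>
            let j := i + idx
            PySem.List.pySetD (PySem.List.pySetD mm i (PySem.List.pyGetD mm j 0)) j (PySem.List.pyGetD mm i 0)) m)
          + (w - pvW 1 m)) pvMOD
      ∧ (is.foldl
          (fun mm i =>
            let j := i + idx
            PySem.List.pySetD (PySem.List.pySetD mm i (PySem.List.pyGetD mm j 0)) j (PySem.List.pyGetD mm i 0)) m).length
        = m.length := by
  intro is
  induction is with
  | nil =>
    intro m w _
    refine ⟨rfl, ?_, rfl⟩
    simp only [List.foldl_nil]
    congr 1; ring
  | cons i is ih =>
    intro m w hb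
    obtain ⟨hi0, hilen⟩ := hb i (by simp)
    have hlen : m.length = (PySem.List.pySetD (PySem.List.pySetD m i (PySem.List.pyGetD m (i+idx) 0)) (i+idx) (PySem.List.pyGetD m i 0)).length := by
      rw [PySem.List.pySetD_of_nonneg _ _ hi0, PySem.List.pySetD_of_nonneg _ _ (by omega : (0:Int) ≤ i + idx)]
      simp
    have hswap := pvW_swap m i (i + idx) hi0 (by omega) (by omega) (by omega) (by omega)
    simp only [List.foldl_cons]
    have hstep : PySem.Int.mod (PySem.Int.mod w pvMOD + idx * (PySem.List.pyGetD m i 0 - PySem.List.pyGetD m (i+idx) 0)) pvMOD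
        = PySem.Int.mod (w + idx * (PySem.List.pyGetD m i 0 - PySem.List.pyGetD m (i+idx) 0)) pvMOD := by
      simp only [PySem.Int.mod_eq_emod_of_pos pvMOD_pos]; rw [Int.emod_add_emod]
    rw [hstep]
    obtain ⟨h1, h2, h3⟩ := ih
      (PySem.List.pySetD (PySem.List.pySetD m i (PySem.List.pyGetD m (i+idx) 0)) (i+idx) (PySem.List.pyGetD m i 0))
      (w + idx * (PySem.List.pyGetD m i 0 - PySem.List.pyGetD m (i+idx) 0))
      (by intro x hx; have := hb x (by simp [hx]); omega)
    refine ⟨h1, ?_, by rw [h3, ← hlen]⟩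
    rw [h2]
    congr 1
    rw [hswap]; ring

-- A's inner loop as the plain fold used in the invariant
theorem pvSwapLoop_eq (idx n : Int) (mem : List Int) :
    pvSwapLoop idx n mem
      = (PySem.List.pyRange idx (n - idx) 1).foldl
          (fun mm i =>
            let j := i + idx
            PySem.List.pySetD (PySem.List.pySetD mm i (PySem.List.pyGetD mm j 0)) j (PySem.List.pyGetD mm i 0)) mem := rfl

-- bounds for the indices of round idx, from Pre_
theorem pvRange_bounds (n idx : Int) (mem : List Int)
    (hpre : n ≤ (mem.length : Int) ∨ n ≤ 2) (hidx : 1 ≤ idx) :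
    ∀ i ∈ PySem.List.pyRange idx (n - idx) 1, 0 ≤ i ∧ i + idx < (mem.length : Int) := by
  intro i hi
  rw [PySem.List.mem_pyRange_one] at hi
  have hn3 : 3 ≤ n := by omega
  rcases hpre with h | h
  · omega
  · omega

-- outer loop invariant
theorem pvOuter_inv (n : Int) (len0 : Nat) :
    ∀ (idxs : List Int) (mem : List Int) (mx : Int),
      (∀ idx ∈ idxs, 1 ≤ idx) →
      (n ≤ (len0 : Int) ∨ n ≤ 2) →
      mem.length = len0 →
      (idxs.foldl
        (fun (st : (List Int × Int) × Int) idx =>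
          let r := pvRoundB idx n st.1
          (r, max st.2 r.2))
        ((mem, PySem.Int.mod (pvW 1 mem) pvMOD), max mx (PySem.Int.mod (pvW 1 mem) pvMOD))).2
      = (idxs.foldl
        (fun (st : List Int × Int) idx =>
          let m2 := pvSwapLoop idx n st.1
          (m2, max st.2 (pvCalcEff m2)))
        (mem, max mx (pvCalcEff mem))).2 := by
  intro idxs
  induction idxs with
  | nil =>
    intro mem mx _ _ _
    simp [pvCalcEff_eq]
  | cons idx idxs ih =>
    intro mem mx hidxs hpre hlen
    simp only [List.foldl_cons]
    have hpre' : n ≤ (mem.length : Int) ∨ n ≤ 2 := by rw [hlen]; exact hpre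
    have hb := pvRange_bounds n idx mem hpre' (hidxs idx (by simp))
    obtain ⟨h1, h2, h3⟩ := pvInner_inv idx (by have := hidxs idx (by simp); omega)
      (PySem.List.pyRange idx (n - idx) 1) mem (pvW 1 mem) hb
    have hr1 : (pvRoundB idx n (mem, PySem.Int.mod (pvW 1 mem) pvMOD)).1 = pvSwapLoop idx n mem := by
      rw [pvSwapLoop_eq]; exact h1
    have hr2 : (pvRoundB idx n (mem, PySem.Int.mod (pvW 1 mem) pvMOD)).2
        = PySem.Int.mod (pvW 1 (pvSwapLoop idx n mem)) pvMOD := by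
      rw [pvSwapLoop_eq]
      rw [show pvRoundB idx n (mem, PySem.Int.mod (pvW 1 mem) pvMOD)
            = (PySem.List.pyRange idx (n - idx) 1).foldl
                (fun (st : List Int × Int) i =>
                  let mm := st.1
                  let j := i + idx
                  let cur := PySem.Int.mod (st.2 + idx * (PySem.List.pyGetD mm i 0 - PySem.List.pyGetD mm j 0)) pvMOD
                  (PySem.List.pySetD (PySem.List.pySetD mm i (PySem.List.pyGetD mm j 0)) j (PySem.List.pyGetD mm i 0), cur))
                (mem, PySem.Int.mod (pvW 1 mem) pvMOD) from rfl]
      rw [h2]; congr 1; ring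
    have hlen2 : (pvSwapLoop idx n mem).length = len0 := by
      rw [pvSwapLoop_eq, h3, hlen]
    have := ih (pvSwapLoop idx n mem)
      (max mx (PySem.Int.mod (pvW 1 mem) pvMOD))
      (fun x hx => hidxs x (by simp [hx])) hpre hlen2
    calc (idxs.foldl
        (fun (st : (List Int × Int) × Int) idx =>
          let r := pvRoundB idx n st.1
          (r, max st.2 r.2))
        (pvRoundB idx n (mem, PySem.Int.mod (pvW 1 mem) pvMOD),
          max (max mx (PySem.Int.mod (pvW 1 mem) pvMOD)) (pvRoundB idx n (mem, PySem.Int.mod (pvW 1 mem) pvMOD)).2)).2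
        = (idxs.foldl
            (fun (st : (List Int × Int) × Int) idx =>
              let r := pvRoundB idx n st.1
              (r, max st.2 r.2))
            ((pvSwapLoop idx n mem, PySem.Int.mod (pvW 1 (pvSwapLoop idx n mem)) pvMOD),
              max (max mx (PySem.Int.mod (pvW 1 mem) pvMOD)) (PySem.Int.mod (pvW 1 (pvSwapLoop idx n mem)) pvMOD))).2 := by
          rw [show pvRoundB idx n (mem, PySem.Int.mod (pvW 1 mem) pvMOD)
                = ((pvRoundB idx n (mem, PySem.Int.mod (pvW 1 mem) pvMOD)).1,
                   (pvRoundB idx n (mem, PySem.Int.mod (pvW 1 mem) pvMOD)).2) from rfl, hr1, hr2]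
      _ = (idxs.foldl
            (fun (st : List Int × Int) idx =>
              let m2 := pvSwapLoop idx n st.1
              (m2, max st.2 (pvCalcEff m2)))
            (pvSwapLoop idx n mem,
              max (max mx (PySem.Int.mod (pvW 1 mem) pvMOD)) (pvCalcEff (pvSwapLoop idx n mem)))).2 := this
      _ = _ := by rw [pvCalcEff_eq mem]

-- ===== VERDICT (by name: the statement is the Claim_ definition above) =====
theorem maximumEfficiency_spec : Claim_equal_maximumEfficiency := by
  intro n memory _ hpre
  unfold Spec_maximumEfficiency maximumEfficiency maximumEfficiency_alt
  have hcur0 : PySem.Int.mod (((PySem.List.enumerate memory).map (fun p => (p.1 + 1) * p.2)).sum) pvMOD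
      = PySem.Int.mod (pvW 1 memory) pvMOD := by
    rw [pvW_enum memory 0]; norm_num
  rw [hcur0]
  have h := pvOuter_inv n memory.length (PySem.List.pyRange 1 (PySem.Int.floordiv n 2 + 1) 1)
    memory (PySem.Int.mod (pvW 1 memory) pvMOD)
    (by intro idx hidx; rw [PySem.List.mem_pyRange_one] at hidx; omega)
    (by unfold Pre_maximumEfficiency at hpre; exact hpre) rfl
  have hA : max (PySem.Int.mod (pvW 1 memory) pvMOD) (pvCalcEff memory)
      = PySem.Int.mod (pvW 1 memory) pvMOD := by rw [pvCalcEff_eq]; exact max_self _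
  rw [hA] at h
  simp only [max_self] at h
  rw [pvCalcEff_eq memory]
  exact h.symm
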